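-- pv_equiv track=rewrite | github.com/tomerni/PythonProjects | wordsearch.py | search_right_matrix
-- ===== SOURCE A (Python) =====
-- def search_right_row(word, row):
--     """
--     Searches the word in the given row to the right
--     :param row: The row that is being checked
--     :param word: The word that is being searched
--     :return: The word appears number
--     """
--     appears_counter = 0
--     current_col = 0
--     # Running until the word is longer then the columns reminded
--     while current_col <= len(row) - len(word):
--         correct_letters_counter = 0
--         # Checking every letter of the word
--         for index in range(current_col, current_col + len(word)):
--             # Correct letter
--             if row[index] == word[correct_letters_counter]:
--                 correct_letters_counter += 1
--             # Incorrect word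
--             else:
--                 break
--         # Found 1 appearance of the word
--         if correct_letters_counter == len(word):
--             appears_counter += 1
--             current_col += 1
--         else:
--             current_col += 1
--     return appears_counter
--
-- def search_right_matrix(matrix, word):
--     """
--     Searches the word in the given matrix to the right
--     :param matrix: The matrix that is being checked
--     :param word: The word that is being searched
--     :return: The word appears number
--     """
--     if word == '':
--         return 0
--     appears_counter = 0
--     # Using the search_right_row to search the word in every row
--     for row in range(len(matrix)):
--         current_row = [matrix[row][col] for col in range(len(matrix[0]))]
--         # Adds the appears in the row
--         appears_counter += search_right_row(word, current_row)
--     return appears_counter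
-- ===== SOURCE B (Python) =====
-- def search_right_matrix(matrix, word):
--     if word == '':
--         return 0
--     pattern = list(word)
--     m = len(pattern)
--     ncols = len(matrix[0]) if matrix else 0
--     total = 0
--     for row in matrix:
--         cells = row[:ncols]
--         # set of still-viable start columns, refined one pattern position at a time
--         cands = list(range(len(cells) - m + 1))
--         for j, pc in enumerate(pattern):
--             cands = [i for i in cands if cells[i + j] == pc]
--         total += len(cands)
--     return total
-- ===== Notes on version B (the rewrite author's own statement) =====
-- stated objective: alternative
-- what changed: Per row, B maintains the list of still-viable start columns and refines it once per pattern position (filtering the candidate set), instead of A's while-loop over start columns with an inner per-letter scan that breaks on mismatch.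
import Mathlib
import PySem

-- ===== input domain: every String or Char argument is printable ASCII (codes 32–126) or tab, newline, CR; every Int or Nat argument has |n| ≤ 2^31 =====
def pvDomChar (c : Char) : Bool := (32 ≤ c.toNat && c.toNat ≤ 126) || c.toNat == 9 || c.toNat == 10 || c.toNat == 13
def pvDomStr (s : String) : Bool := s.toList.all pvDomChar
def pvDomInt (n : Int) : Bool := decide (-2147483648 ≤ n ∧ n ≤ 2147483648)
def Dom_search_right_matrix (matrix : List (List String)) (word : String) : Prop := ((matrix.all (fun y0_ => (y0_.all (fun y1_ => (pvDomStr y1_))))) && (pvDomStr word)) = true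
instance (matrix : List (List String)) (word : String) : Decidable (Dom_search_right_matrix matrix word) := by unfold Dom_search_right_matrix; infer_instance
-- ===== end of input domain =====

-- B keeps the set of still-viable start columns per row and refines it once per pattern
-- position, instead of A's per-column inner letter scan with break (objective: alternative).
-- ===== PORT A =====
-- inner 'for index in range(current_col, current_col+len(word))' with break
def srrFor (row : List String) (wl : List Char) (idx stop clc : Nat) : Nat :=
  if idx < stop then
    (if row.getD idx "" == String.singleton (wl.getD clc ' ') then
      srrFor row wl (idx + 1) stop (clc + 1)
    else clc)
  else clc
termination_by stop - idx

-- the while loop of search_right_row (fuel = number of iterations it performs)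
def srrWhile (row : List String) (wl : List Char) : Nat → Nat → Int → Int
  | 0, _, ac => ac
  | fuel + 1, cc, ac =>
    if (cc : Int) ≤ (row.length : Int) - (wl.length : Int) then
      (if srrFor row wl cc (cc + wl.length) 0 = wl.length then
        srrWhile row wl fuel (cc + 1) (ac + 1)
      else
        srrWhile row wl fuel (cc + 1) ac)
    else ac

def search_right_row (word : String) (row : List String) : Int :=
  srrWhile row word.toList (((row.length : Int) - (word.toList.length : Int) + 1).toNat) 0 0

def search_right_matrix (matrix : List (List String)) (word : String) : Int :=
  if word == "" then 0
  else
    (List.range matrix.length).foldl (fun ac r =>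
      let cur := (List.range (matrix.headD []).length).map (fun c => (matrix.getD r []).getD c "")
      ac + search_right_row word cur) 0

-- ===== PORT B =====
def altRow (pat : List String) (cells : List String) : Int :=
  ((pat.zipIdx.foldl
    (fun cs pj => cs.filter (fun i => cells.getD (i + pj.2) "" == pj.1))
    (List.range (cells.length + 1 - pat.length))).length : Int)

def search_right_matrix_alt (matrix : List (List String)) (word : String) : Int :=
  if word == "" then 0
  else
    let pat := word.toList.map (fun c => String.singleton c)
    let ncols := (matrix.headD []).length
    matrix.foldl (fun total row => total + altRow pat (row.take ncols)) 0

-- ===== PRECONDITION & SPEC =====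
-- Pre_ excludes only inputs where A raises IndexError: a nonempty word with some row
-- shorter than row 0 (A reads matrix[row][col] for every col < len(matrix[0])).
-- (B instead clips each row to len(matrix[0]) and returns the count over the clipped rows.)
def Pre_search_right_matrix (matrix : List (List String)) (word : String) : Prop :=
  word = "" ∨ ∀ row ∈ matrix, (matrix.headD []).length ≤ row.length
instance (matrix : List (List String)) (word : String) : Decidable (Pre_search_right_matrix matrix word) := by unfold Pre_search_right_matrix; infer_instance

def pvWitness_search_right_matrix : List (List String) × String := ([["a", "b"], ["b", "a"]], "a")

def Spec_search_right_matrix (matrix : List (List String)) (word : String) (out : Int) : Prop := out = search_right_matrix_alt matrix word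
instance (matrix : List (List String)) (word : String) (out : Int) : Decidable (Spec_search_right_matrix matrix word out) := by unfold Spec_search_right_matrix; infer_instance

-- ===== CLAIM (what is proved, stated in full; the proofs are below) =====
def Claim_equal_search_right_matrix : Prop := ∀ (matrix : List (List String)) (word : String), Dom_search_right_matrix matrix word → Pre_search_right_matrix matrix word → Spec_search_right_matrix matrix word (search_right_matrix matrix word)

-- ===== LEMMAS AND PROOFS =====
-- the window predicate both row counters compute
def winB (cells : List String) (wl : List Char) (i : Nat) : Bool :=
  decide (∀ j < wl.length, cells.getD (i + j) "" = String.singleton (wl.getD j ' '))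

lemma forLem (cells : List String) (wl : List Char) (cc : Nat) :
    ∀ d k, k + d = wl.length →
      (srrFor cells wl (cc + k) (cc + wl.length) k = wl.length ↔
        ∀ j, k ≤ j → j < wl.length →
          cells.getD (cc + j) "" = String.singleton (wl.getD j ' ')) := by
  intro d
  induction d with
  | zero =>
    intro k hk
    have hk' : k = wl.length := by omega
    subst hk'
    rw [srrFor, if_neg (by omega)]
    constructor
    · intro _ j hj1 hj2; omega
    · intro _; rfl
  | succ d ih =>
    intro k hk
    rw [srrFor]
    have hlt : cc + k < cc + wl.length := by omega
    rw [if_pos hlt]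
    by_cases heq : cells.getD (cc + k) "" = String.singleton (wl.getD k ' ')
    · rw [if_pos (by simpa using heq)]
      have := ih (k + 1) (by omega)
      rw [show cc + k + 1 = cc + (k + 1) by omega, this]
      constructor
      · intro h j hj1 hj2
        rcases Nat.eq_or_lt_of_le hj1 with h' | h'
        · subst h'; exact heq
        · exact h j h' hj2
      · intro h j hj1 hj2; exact h j (by omega) hj2
    · rw [if_neg (by simpa using heq)]
      constructor
      · intro h; omega
      · intro h; exact absurd (h k le_rfl (by omega)) heq

lemma whileLem (cells : List String) (wl : List Char) (hm : wl.length ≤ cells.length) :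
    ∀ fuel cc ac, cc + fuel = cells.length + 1 - wl.length →
      srrWhile cells wl fuel cc ac =
        ac + ((List.range' cc fuel).countP (winB cells wl) : Int) := by
  intro fuel
  induction fuel with
  | zero => intro cc ac _; simp [srrWhile]
  | succ fuel ih =>
    intro cc ac hcc
    rw [srrWhile]
    rw [if_pos (by omega)]
    have hfor := forLem cells wl cc wl.length 0 (by omega)
    rw [show cc + 0 = cc from rfl] at hfor
    have hrange : List.range' cc (fuel + 1) = cc :: List.range' (cc + 1) fuel :=
      List.range'_succ ..
    by_cases hwin : ∀ j < wl.length, cells.getD (cc + j) "" = String.singleton (wl.getD j ' ')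
    · rw [if_pos (hfor.mpr (fun j _ => hwin j))]
      rw [ih (cc + 1) (ac + 1) (by omega), hrange]
      have hb : winB cells wl cc = true := by
        simp only [winB, decide_eq_true_eq]; exact hwin
      rw [List.countP_cons]
      simp only [hb, if_pos]
      push_cast
      ring
    · rw [if_neg (fun h => hwin (fun j hj => hfor.mp h j (Nat.zero_le j) hj))]
      rw [ih (cc + 1) ac (by omega), hrange]
      have hb : winB cells wl cc = false := by
        simp only [winB, decide_eq_false_iff_not]; exact hwin
      rw [List.countP_cons]
      simp [hb]

lemma rowLem (word : String) (cells : List String) :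
    search_right_row word cells =
      ((List.range (cells.length + 1 - word.toList.length)).countP
        (winB cells word.toList) : Int) := by
  unfold search_right_row
  by_cases hm : word.toList.length ≤ cells.length
  · have hfuel : (((cells.length : Int) - (word.toList.length : Int) + 1)).toNat
        = cells.length + 1 - word.toList.length := by omega
    rw [hfuel, whileLem cells word.toList hm _ 0 0 (by omega), List.range_eq_range']
    simp
  · have hfuel : (((cells.length : Int) - (word.toList.length : Int) + 1)).toNat = 0 := by
      omega
    have hr : cells.length + 1 - word.toList.length = 0 := by omega
    rw [hfuel, hr]
    simp [srrWhile]

lemma bFold (cells : List String) :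
    ∀ (pl : List Char) (t : Nat) (cs : List Nat),
      ((pl.map String.singleton).zipIdx t).foldl
        (fun cs' pj => cs'.filter (fun i => cells.getD (i + pj.2) "" == pj.1)) cs
      = cs.filter (fun i => decide (∀ j < pl.length,
          cells.getD (i + t + j) "" = String.singleton (pl.getD j ' '))) := by
  intro pl
  induction pl with
  | nil => intro t cs; simp
  | cons c pl ih =>
    intro t cs
    simp only [List.map_cons, List.zipIdx_cons, List.foldl_cons]
    rw [ih (t + 1), List.filter_filter]
    apply List.filter_congr
    intro i _
    rw [Bool.eq_iff_iff]
    simp only [List.length_cons, Bool.and_eq_true, decide_eq_true_eq, beq_iff_eq]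
    constructor
    · rintro ⟨h, h0⟩ j hj
      cases j with
      | zero => simpa using h0
      | succ j =>
        have := h j (by omega)
        simpa [show i + (t + 1) + j = i + t + (j + 1) by omega] using this
    · intro h
      refine ⟨fun j hj => ?_, by simpa using h 0 (by omega)⟩
      have := h (j + 1) (by omega)
      simpa [show i + t + (j + 1) = i + (t + 1) + j by omega] using this

lemma altRowLem (cells : List String) (wl : List Char) :
    altRow (wl.map String.singleton) cells =
      ((List.range (cells.length + 1 - wl.length)).countP (winB cells wl) : Int) := by
  unfold altRow
  simp only [List.length_map]
  rw [bFold cells wl 0 _, List.countP_eq_length_filter]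
  congr 1

lemma takeLem (l : List String) (k : Nat) (hk : k ≤ l.length) :
    (List.range k).map (fun c => l.getD c "") = l.take k := by
  apply List.ext_getElem
  · simp; omega
  · intro i h1 h2
    simp only [List.getElem_map, List.getElem_range, List.getElem_take]
    rw [List.getD_eq_getElem]

lemma rowEq (word : String) (cells : List String) :
    search_right_row word cells = altRow (word.toList.map (fun c => String.singleton c)) cells := by
  rw [rowLem, altRowLem]

-- ===== VERDICT (by name: the statement is the Claim_ definition above) =====
theorem search_right_matrix_spec : Claim_equal_search_right_matrix := by
  intro matrix word _ hpre
  unfold Spec_search_right_matrix search_right_matrix search_right_matrix_alt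
  by_cases hw : word = ""
  · simp [hw]
  · rw [if_neg (by simpa using hw), if_neg (by simpa using hw)]
    have hrows : ∀ row ∈ matrix, (matrix.headD []).length ≤ row.length := by
      rcases hpre with h | h
      · exact absurd h hw
      · exact h
    rw [PySem.List.foldl_add, PySem.List.foldl_add]
    congr 1
    congr 1
    apply List.ext_getElem
    · simp
    · intro r h1 h2
      have hr : r < matrix.length := by simpa using h1
      simp only [List.getElem_map, List.getElem_range]
      have hmem : matrix[r] ∈ matrix := List.getElem_mem hr
      have hlen := hrows _ hmem
      rw [List.getD_eq_getElem _ _ hr, takeLem _ _ hlen, rowEq]
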